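-- pv_equiv track=rewrite | github.com/Joel-tec26/IntroduccionProgra | iteracionNumerica2.py | repetirDigito
-- ===== SOURCE A (Python) =====
-- def contarDigitos(pnum):
--     """
--     Funcionalidad:
--     Cuenta los digitos de una cifra
--     Entradas:
--     - pnum(int): número a valorar
--     Salidas:
--     - La cantidad de digitos de la frase
--     """
--     contador=0
--     while pnum>0:
--         contador+=1
--         pnum//=10
--     return contador
--
-- def repetirDigito(pdigito,pnum,prepeticiones):
--     """
--     Funcionalidad:
--     Construye un nuevo número reemplazando cada aparición de un dígito específico
--     por una secuencia del mismo dígito repetida n veces, donde n es el valor del tercer parámetro.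
--     Mantiene el orden original de los demás dígitos.
--     Entradas:
--     - pnum(int): número original a analizar.
--     - pdigito(int): El dígito que se desea repetir
--     -prepeticiones(int): La cantidad de veces que aparecerá el dígito en el resultado
--     Salidas:
--     - resultado(int): El nuevo número formado con las repeticiones aplicadas
--     """
--     resultado=0
--     numDigitos=contarDigitos(pnum)
--     digito=0
--     while numDigitos>0:
--         digito=(pnum%10**numDigitos)//10**(numDigitos-1)
--         if digito==pdigito:
--             cont=0
--             while prepeticiones>cont:
--                 resultado*=10
--                 resultado+=pdigito
--                 cont+=1
--         else:
--             resultado*=10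
--             resultado+=digito
--         numDigitos-=1
--     return resultado
-- ===== SOURCE B (Python) =====
-- def repetirDigito(pdigito, pnum, prepeticiones):
--     resultado = 0
--     mult = 1
--     while pnum > 0:
--         pnum, digito = divmod(pnum, 10)
--         if digito == pdigito:
--             for _ in range(prepeticiones):
--                 resultado += pdigito * mult
--                 mult *= 10
--         else:
--             resultado += digito * mult
--             mult *= 10
--     return resultado
-- ===== Notes on version B (the rewrite author's own statement) =====
-- stated objective: simpler
-- what changed: Replaced A's two-pass scheme (contarDigitos helper plus MSB-first extraction of each digit via pnum %/ 10**k) by a single LSB-first divmod loop that assembles the result back-to-front with a running place-value multiplier, eliminating the helper and all power computations.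
import Mathlib
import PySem

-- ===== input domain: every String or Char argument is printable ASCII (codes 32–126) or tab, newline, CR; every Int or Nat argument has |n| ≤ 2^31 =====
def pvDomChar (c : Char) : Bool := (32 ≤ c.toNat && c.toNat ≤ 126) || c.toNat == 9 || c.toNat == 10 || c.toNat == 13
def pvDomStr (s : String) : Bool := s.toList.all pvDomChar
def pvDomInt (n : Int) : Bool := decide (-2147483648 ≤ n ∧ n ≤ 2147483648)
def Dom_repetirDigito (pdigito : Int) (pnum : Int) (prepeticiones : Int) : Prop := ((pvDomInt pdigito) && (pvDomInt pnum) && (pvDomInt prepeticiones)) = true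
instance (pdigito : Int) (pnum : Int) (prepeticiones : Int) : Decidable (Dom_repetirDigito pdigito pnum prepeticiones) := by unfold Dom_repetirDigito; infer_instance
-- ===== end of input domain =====

-- B replaces A's digit-count + 10**k MSB-first extraction by one LSB-first divmod pass
-- with a running place-value multiplier (objective: simpler).

-- ===== PORT A =====
def contarDigitosAux (pnum : Int) (contador : Int) : Int :=
  if pnum > 0 then contarDigitosAux (PySem.Int.floordiv pnum 10) (contador + 1) else contador
termination_by pnum.toNat
decreasing_by
  rename_i h
  rw [PySem.Int.floordiv_eq_ediv_of_pos (by norm_num)]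
  omega

def contarDigitos (pnum : Int) : Int := contarDigitosAux pnum 0

def repetirInnerA (pdigito : Int) (prepeticiones : Int) (resultado : Int) (cont : Int) : Int :=
  if prepeticiones > cont then repetirInnerA pdigito prepeticiones (resultado * 10 + pdigito) (cont + 1)
  else resultado
termination_by (prepeticiones - cont).toNat
decreasing_by omega

def repetirLoopA (pdigito : Int) (pnum : Int) (prepeticiones : Int) (resultado : Int) (numDigitos : Int) : Int :=
  if numDigitos > 0 then
    -- digito = (pnum % 10**numDigitos) // 10**(numDigitos-1); exponents are > 0 resp. ≥ 0 here
    let digito := PySem.Int.floordiv (PySem.Int.mod pnum (10 ^ numDigitos.toNat)) (10 ^ (numDigitos - 1).toNat)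
    let resultado' := if digito = pdigito then repetirInnerA pdigito prepeticiones resultado 0
                      else resultado * 10 + digito
    repetirLoopA pdigito pnum prepeticiones resultado' (numDigitos - 1)
  else resultado
termination_by numDigitos.toNat
decreasing_by omega

def repetirDigito (pdigito : Int) (pnum : Int) (prepeticiones : Int) : Int :=
  repetirLoopA pdigito pnum prepeticiones 0 (contarDigitos pnum)

-- ===== PORT B =====
def repetirLoopB (pdigito : Int) (prepeticiones : Int) (pnum : Int) (resultado : Int) (mult : Int) : Int :=
  if pnum > 0 then
    -- pnum, digito = divmod(pnum, 10): divisor is the literal 10 ≠ 0, so divmod never raises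
    let digito := PySem.Int.mod pnum 10
    let pnum' := PySem.Int.floordiv pnum 10
    if digito = pdigito then
      let p := List.foldl (fun (p : Int × Int) (_ : Int) => (p.1 + pdigito * p.2, p.2 * 10))
                 (resultado, mult) (PySem.List.pyRange 0 prepeticiones 1)
      repetirLoopB pdigito prepeticiones pnum' p.1 p.2
    else
      repetirLoopB pdigito prepeticiones pnum' (resultado + digito * mult) (mult * 10)
  else resultado
termination_by pnum.toNat
decreasing_by
  all_goals rename_i h _
  all_goals rw [PySem.Int.floordiv_eq_ediv_of_pos (by norm_num)]
  all_goals omega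

def repetirDigito_alt (pdigito : Int) (pnum : Int) (prepeticiones : Int) : Int :=
  repetirLoopB pdigito prepeticiones pnum 0 1

-- ===== PRECONDITION & SPEC =====
def Spec_repetirDigito (pdigito : Int) (pnum : Int) (prepeticiones : Int) (out : Int) : Prop := out = repetirDigito_alt pdigito pnum prepeticiones
instance (pdigito : Int) (pnum : Int) (prepeticiones : Int) (out : Int) : Decidable (Spec_repetirDigito pdigito pnum prepeticiones out) := by unfold Spec_repetirDigito; infer_instance

-- ===== CLAIM (what is proved, stated in full; the proofs are below) =====
def Claim_equal_repetirDigito : Prop := ∀ (pdigito : Int) (pnum : Int) (prepeticiones : Int), Dom_repetirDigito pdigito pnum prepeticiones → Spec_repetirDigito pdigito pnum prepeticiones (repetirDigito pdigito pnum prepeticiones)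

-- ===== LEMMAS AND PROOFS =====

-- each decimal digit d of pnum contributes these digits to the result
def expandDig (pdigito : Int) (prepeticiones : Int) (d : Nat) : List Int :=
  if (d : Int) = pdigito then List.replicate prepeticiones.toNat pdigito else [(d : Int)]

-- value of a least-significant-first digit list
def valLSB : List Int → Int
  | [] => 0
  | d :: t => d + 10 * valLSB t

lemma contarAux_eq (n : Nat) (c : Int) :
    contarDigitosAux (n : Int) c = c + (Nat.digits 10 n).length := by
  revert c
  induction n using Nat.strong_induction_on with
  | _ n ih =>
    intro c
    rw [contarDigitosAux]
    by_cases h : (n : Int) > 0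
    · have hn : 0 < n := by exact_mod_cast h
      rw [if_pos h]
      have : PySem.Int.floordiv (n : Int) 10 = ((n / 10 : Nat) : Int) := by
        exact_mod_cast PySem.Int.floordiv_natCast n 10
      rw [this, ih (n / 10) (Nat.div_lt_self hn (by norm_num)),
          Nat.digits_def' (by norm_num : (1:Nat) < 10) hn]
      simp; ring
    · have hn : n = 0 := by omega
      rw [if_neg h]; subst hn; simp

lemma innerA_eq (pdigito prepeticiones : Int) : ∀ (m : Nat) (c r : Int),
    (prepeticiones - c).toNat = m →
    repetirInnerA pdigito prepeticiones r c =
      List.foldl (fun r x => r * 10 + x) r (List.replicate m pdigito) := by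
  intro m
  induction m with
  | zero => intro c r h; rw [repetirInnerA, if_neg (by omega)]; simp
  | succ m ih =>
    intro c r h
    rw [repetirInnerA, if_pos (by omega), ih (c + 1) _ (by omega)]
    simp [List.replicate_succ]

lemma digits_getD (k n : Nat) : (Nat.digits 10 n).getD k 0 = n / 10 ^ k % 10 := by
  revert n
  induction k with
  | zero =>
    intro n
    rcases Nat.eq_zero_or_pos n with h | h
    · subst h; simp
    · rw [Nat.digits_def' (by norm_num : (1:Nat) < 10) h]; simp
  | succ k ih =>
    intro n
    rcases Nat.eq_zero_or_pos n with h | h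
    · subst h; simp
    · rw [Nat.digits_def' (by norm_num : (1:Nat) < 10) h]
      simpa [Nat.div_div_eq_div_mul, pow_succ, mul_comm] using ih (n / 10)

lemma loopA_eq (pdigito prepeticiones : Int) (n : Nat) :
    ∀ (k : Nat), k ≤ (Nat.digits 10 n).length → ∀ (r : Int),
    repetirLoopA pdigito (n : Int) prepeticiones r (k : Int) =
      List.foldl (fun r x => r * 10 + x) r
        (((Nat.digits 10 n).take k).reverse.flatMap (expandDig pdigito prepeticiones)) := by
  intro k
  induction k with
  | zero => intro _ r; rw [repetirLoopA, if_neg (by norm_num)]; simp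
  | succ k ih =>
    intro hk r
    rw [repetirLoopA, if_pos (by exact_mod_cast Nat.succ_pos k)]
    have h1 : (((k + 1 : Nat) : Int)).toNat = k + 1 := by simp
    have h2 : (((k + 1 : Nat) : Int) - 1) = ((k : Nat) : Int) := by push_cast; ring
    have hpow : ∀ (j : Nat), (10 : Int) ^ j = ((10 ^ j : Nat) : Int) := by intro j; push_cast; ring
    have hmod : PySem.Int.mod (n : Int) ((10 : Int) ^ (k + 1)) = ((n % 10 ^ (k + 1) : Nat) : Int) := by
      rw [hpow]; exact_mod_cast PySem.Int.mod_natCast n (10 ^ (k + 1))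
    have hdiv : PySem.Int.floordiv ((n % 10 ^ (k + 1) : Nat) : Int) ((10 : Int) ^ k)
        = ((n % 10 ^ (k + 1) / 10 ^ k : Nat) : Int) := by
      rw [hpow]; exact_mod_cast PySem.Int.floordiv_natCast (n % 10 ^ (k + 1)) (10 ^ k)
    have hdigit : n % 10 ^ (k + 1) / 10 ^ k = (Nat.digits 10 n).getD k 0 := by
      rw [digits_getD, ← Nat.mod_mul_right_div_self, ← pow_succ]
    have hlt : k < (Nat.digits 10 n).length := hk
    have h4 : (((k : Nat) : Int)).toNat = k := by simp
    have hgd : (Nat.digits 10 n).getD k 0 = (Nat.digits 10 n)[k] := List.getD_eq_getElem _ _ hlt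
    have htake : ((Nat.digits 10 n).take (k + 1)).reverse
        = (Nat.digits 10 n).getD k 0 :: ((Nat.digits 10 n).take k).reverse := by
      have ht : (Nat.digits 10 n).take (k + 1)
          = (Nat.digits 10 n).take k ++ [(Nat.digits 10 n)[k]] := by
        rw [List.take_add_one, List.getElem?_eq_getElem hlt]; rfl
      rw [ht, List.reverse_append, hgd]; rfl
    simp only [h1, h2, h4, hmod, hdiv, hdigit]
    rw [ih (Nat.le_of_lt hlt), htake, List.flatMap_cons, List.foldl_append]
    congr 1
    by_cases hd : (((Nat.digits 10 n).getD k 0 : Nat) : Int) = pdigito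
    · rw [if_pos hd, expandDig, if_pos hd,
          innerA_eq pdigito prepeticiones prepeticiones.toNat 0 r (by omega)]
    · rw [if_neg hd, expandDig, if_neg hd]; simp

lemma foldl_ignore_replicate (pdigito : Int) : ∀ (l : List Int) (init : Int × Int),
    List.foldl (fun (p : Int × Int) (_ : Int) => (p.1 + pdigito * p.2, p.2 * 10)) init l =
      List.foldl (fun (p : Int × Int) (d : Int) => (p.1 + d * p.2, p.2 * 10)) init
        (List.replicate l.length pdigito) := by
  intro l
  induction l with
  | nil => simp
  | cons x t ih => intro init; simp [List.replicate_succ, ih]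

lemma len_pyRange01 (p : Int) : (PySem.List.pyRange 0 p 1).length = p.toNat := by
  simp [PySem.List.pyRange]; omega

lemma loopB_eq (pdigito prepeticiones : Int) : ∀ (n : Nat) (r m : Int),
    repetirLoopB pdigito prepeticiones (n : Int) r m =
      (List.foldl (fun (p : Int × Int) (d : Int) => (p.1 + d * p.2, p.2 * 10)) (r, m)
        ((Nat.digits 10 n).flatMap (expandDig pdigito prepeticiones))).1 := by
  intro n
  induction n using Nat.strong_induction_on with
  | _ n ih =>
    intro r m
    rw [repetirLoopB]
    by_cases h : (n : Int) > 0
    · have hn : 0 < n := by exact_mod_cast h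
      rw [if_pos h]
      have hmod : PySem.Int.mod (n : Int) 10 = ((n % 10 : Nat) : Int) := by
        exact_mod_cast PySem.Int.mod_natCast n 10
      have hdiv : PySem.Int.floordiv (n : Int) 10 = ((n / 10 : Nat) : Int) := by
        exact_mod_cast PySem.Int.floordiv_natCast n 10
      rw [Nat.digits_def' (by norm_num : (1:Nat) < 10) hn]
      simp only [List.flatMap_cons, List.foldl_append, hmod, hdiv]
      by_cases hd : ((n % 10 : Nat) : Int) = pdigito
      · rw [if_pos hd]
        rw [foldl_ignore_replicate, len_pyRange01,
            ih (n / 10) (Nat.div_lt_self hn (by norm_num))]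
        rw [expandDig, if_pos hd]
      · rw [if_neg hd, ih (n / 10) (Nat.div_lt_self hn (by norm_num))]
        rw [expandDig, if_neg hd]
        simp
    · have hn : n = 0 := by omega
      rw [if_neg h]; subst hn; simp

lemma pairFold_eq : ∀ (L : List Int) (r m : Int),
    List.foldl (fun (p : Int × Int) (d : Int) => (p.1 + d * p.2, p.2 * 10)) (r, m) L =
      (r + m * valLSB L, m * 10 ^ L.length) := by
  intro L
  induction L with
  | nil => simp [valLSB]
  | cons d t ih => intro r m; simp [valLSB, ih]; constructor <;> ring

lemma msbFold_eq : ∀ (L : List Int) (r : Int),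
    List.foldl (fun r x => r * 10 + x) r L.reverse = r * 10 ^ L.length + valLSB L := by
  intro L
  induction L with
  | nil => simp [valLSB]
  | cons d t ih => intro r; simp [valLSB, List.foldl_append, ih]; ring

lemma expandDig_reverse (pdigito prepeticiones : Int) (d : Nat) :
    (expandDig pdigito prepeticiones d).reverse = expandDig pdigito prepeticiones d := by
  unfold expandDig; split <;> simp

-- ===== VERDICT (by name: the statement is the Claim_ definition above) =====
theorem repetirDigito_spec : Claim_equal_repetirDigito := by
  intro pdigito pnum prepeticiones _
  unfold Spec_repetirDigito repetirDigito repetirDigito_alt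
  by_cases h : pnum > 0
  · have hpn : pnum = ((pnum.toNat : Nat) : Int) := by omega
    rw [hpn]
    have hc : contarDigitos ((pnum.toNat : Nat) : Int)
        = ((Nat.digits 10 pnum.toNat).length : Int) := by
      unfold contarDigitos; rw [contarAux_eq]; simp
    rw [hc, loopA_eq pdigito prepeticiones pnum.toNat _ le_rfl,
        loopB_eq pdigito prepeticiones pnum.toNat, List.take_length,
        List.flatMap_reverse]
    have hpal : (List.reverse ∘ expandDig pdigito prepeticiones)
        = expandDig pdigito prepeticiones :=
      funext (expandDig_reverse pdigito prepeticiones)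
    rw [hpal, msbFold_eq, pairFold_eq]
    simp
  · have hc : contarDigitos pnum = 0 := by
      unfold contarDigitos; rw [contarDigitosAux, if_neg h]
    rw [hc, repetirLoopA, if_neg (by omega), repetirLoopB, if_neg h]
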